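-- pv_equiv track=rewrite | github.com/pa3757/aischoolpython | PycharmProjects/pythonProject/codingtest.py | solution
-- ===== SOURCE A (Python) =====
-- def solution(arr, queries):
--     for query in queries:
--         i, j = query
--         for x in range(len(arr)):
--             for y in range(len(arr)):
--                 # 만약 x가 i이고 y가 j이면 교환 수행
--                 if x == i and y == j:
--                     arr[x], arr[y] = arr[y], arr[x]
--
--     return arr
-- ===== SOURCE B (Python) =====
-- def solution(arr, queries):
--     n = len(arr)
--     for i, j in queries:
--         if 0 <= i < n and 0 <= j < n:
--             arr[i], arr[j] = arr[j], arr[i]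
--     return arr
-- ===== Notes on version B (the rewrite author's own statement) =====
-- stated objective: faster
-- what changed: Replaces A's per-query quadratic scan of all (x,y) index pairs with a single direct guarded swap arr[i],arr[j]=arr[j],arr[i] per query (out-of-range queries are no-ops, exactly as in A).
import Mathlib
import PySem

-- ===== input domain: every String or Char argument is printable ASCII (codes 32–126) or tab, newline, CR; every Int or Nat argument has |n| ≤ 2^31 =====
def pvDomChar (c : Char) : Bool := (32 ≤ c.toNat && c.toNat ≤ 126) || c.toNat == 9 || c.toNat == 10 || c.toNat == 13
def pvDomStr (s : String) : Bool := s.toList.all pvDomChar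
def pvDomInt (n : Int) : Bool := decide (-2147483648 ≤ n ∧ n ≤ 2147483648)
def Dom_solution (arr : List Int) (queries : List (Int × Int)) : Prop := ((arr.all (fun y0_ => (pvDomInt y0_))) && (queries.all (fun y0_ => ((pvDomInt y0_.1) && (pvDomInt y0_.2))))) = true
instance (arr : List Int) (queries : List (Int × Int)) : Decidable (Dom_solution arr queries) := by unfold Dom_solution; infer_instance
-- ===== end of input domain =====

-- B replaces A's per-query scan of all (x,y) index pairs by one direct guarded swap per
-- query (out-of-range queries are no-ops, exactly as in A). Both Pythons mutate `arr` in
-- place and return it; the equivalence proved here is about the return value.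

-- ===== PORT A =====
-- for each query, scan all x, all y, swap when x == i and y == j (simultaneous assignment)
def solution (arr : List Int) (queries : List (Int × Int)) : List Int :=
  queries.foldl (fun a q =>
    (List.range a.length).foldl (fun a2 (x : Nat) =>
      (List.range a2.length).foldl (fun a3 (y : Nat) =>
        if (x : Int) = q.1 ∧ (y : Int) = q.2 then
          (a3.set x (a3.getD y 0)).set y (a3.getD x 0)
        else a3) a2) a) arr

-- ===== PORT B =====
-- n = len(arr) once; per query one guarded direct swap
def solution_alt (arr : List Int) (queries : List (Int × Int)) : List Int :=
  let n : Int := (arr.length : Int)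
  queries.foldl (fun a q =>
    if 0 ≤ q.1 ∧ q.1 < n ∧ 0 ≤ q.2 ∧ q.2 < n then
      (a.set q.1.toNat (a.getD q.2.toNat 0)).set q.2.toNat (a.getD q.1.toNat 0)
    else a) arr

-- ===== PRECONDITION & SPEC =====
def Spec_solution (arr : List Int) (queries : List (Int × Int)) (out : List Int) : Prop := out = solution_alt arr queries
instance (arr : List Int) (queries : List (Int × Int)) (out : List Int) : Decidable (Spec_solution arr queries out) := by unfold Spec_solution; infer_instance

-- ===== CLAIM (what is proved, stated in full; the proofs are below) =====
def Claim_equal_solution : Prop := ∀ (arr : List Int) (queries : List (Int × Int)), Dom_solution arr queries → Spec_solution arr queries (solution arr queries)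

-- ===== LEMMAS AND PROOFS =====

-- the inner y-loop of A fires at most once: at y = j (when 0 ≤ j < m and x = i)
theorem pv_inner (i j : Int) (x : Nat) : ∀ (m : Nat) (a : List Int),
    (List.range m).foldl (fun a3 (y : Nat) =>
        if (x : Int) = i ∧ (y : Int) = j then
          (a3.set x (a3.getD y 0)).set y (a3.getD x 0)
        else a3) a
    = if (x : Int) = i ∧ 0 ≤ j ∧ j < (m : Int) then
        (a.set x (a.getD j.toNat 0)).set j.toNat (a.getD x 0)
      else a := by
  intro m
  induction m with
  | zero => intro a; simp
  | succ m ih =>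
    intro a
    rw [List.range_succ, List.foldl_append, ih a]
    simp only [List.foldl_cons, List.foldl_nil]
    by_cases hx : (x : Int) = i
    · by_cases hj : (j : Int) = (m : Int)
      · have hjm : ¬ ((x : Int) = i ∧ 0 ≤ j ∧ j < (m : Int)) := by omega
        have hjt : j.toNat = m := by omega
        rw [if_neg hjm]
        have hc : (x : Int) = i ∧ (m : Int) = j := ⟨hx, hj.symm⟩
        rw [if_pos hc, if_pos (by omega : (x : Int) = i ∧ 0 ≤ j ∧ j < ((m + 1 : Nat) : Int)), hjt]
      · have hc : ¬ ((x : Int) = i ∧ (m : Int) = j) := by omega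
        rw [if_neg hc]
        by_cases h1 : (x : Int) = i ∧ 0 ≤ j ∧ j < (m : Int)
        · rw [if_pos h1, if_pos (by omega : (x : Int) = i ∧ 0 ≤ j ∧ j < ((m + 1 : Nat) : Int))]
        · rw [if_neg h1, if_neg (by omega : ¬ ((x : Int) = i ∧ 0 ≤ j ∧ j < ((m + 1 : Nat) : Int)))]
    · rw [if_neg (by omega : ¬ ((x : Int) = i ∧ (m : Int) = j)),
          if_neg (by omega : ¬ ((x : Int) = i ∧ 0 ≤ j ∧ j < ((m + 1 : Nat) : Int))),
          if_neg (by omega : ¬ ((x : Int) = i ∧ 0 ≤ j ∧ j < (m : Int)))]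

-- A's whole double loop over the first m values of x equals one guarded direct swap
theorem pv_outer (i j : Int) : ∀ (m : Nat) (a : List Int),
    (List.range m).foldl (fun a2 (x : Nat) =>
      (List.range a2.length).foldl (fun a3 (y : Nat) =>
        if (x : Int) = i ∧ (y : Int) = j then
          (a3.set x (a3.getD y 0)).set y (a3.getD x 0)
        else a3) a2) a
    = if 0 ≤ i ∧ i < (m : Int) ∧ 0 ≤ j ∧ j < (a.length : Int) then
        (a.set i.toNat (a.getD j.toNat 0)).set j.toNat (a.getD i.toNat 0)
      else a := by
  intro m
  induction m with
  | zero => intro a; simp; omega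
  | succ m ih =>
    intro a
    rw [List.range_succ, List.foldl_append, ih a]
    simp only [List.foldl_cons, List.foldl_nil]
    by_cases hIn : 0 ≤ i ∧ i < (m : Int) ∧ 0 ≤ j ∧ j < (a.length : Int)
    · rw [if_pos hIn]
      have hlen : ((a.set i.toNat (a.getD j.toNat 0)).set j.toNat (a.getD i.toNat 0)).length = a.length := by
        simp
      rw [pv_inner i j m, hlen]
      rw [if_neg (by omega : ¬ ((m : Int) = i ∧ 0 ≤ j ∧ j < (a.length : Int))),
          if_pos (by omega : 0 ≤ i ∧ i < ((m + 1 : Nat) : Int) ∧ 0 ≤ j ∧ j < (a.length : Int))]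
    · rw [if_neg hIn, pv_inner i j m]
      by_cases hm : (m : Int) = i ∧ 0 ≤ j ∧ j < (a.length : Int)
      · have hit : i.toNat = m := by omega
        rw [if_pos hm, if_pos (by omega : 0 ≤ i ∧ i < ((m + 1 : Nat) : Int) ∧ 0 ≤ j ∧ j < (a.length : Int)), hit]
      · rw [if_neg hm, if_neg (by omega : ¬ (0 ≤ i ∧ i < ((m + 1 : Nat) : Int) ∧ 0 ≤ j ∧ j < (a.length : Int)))]

-- fold the two programs over the query list together, carrying the length invariant
theorem pv_main : ∀ (qs : List (Int × Int)) (a : List Int) (n : Int), n = (a.length : Int) →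
    qs.foldl (fun a q =>
      (List.range a.length).foldl (fun a2 (x : Nat) =>
        (List.range a2.length).foldl (fun a3 (y : Nat) =>
          if (x : Int) = q.1 ∧ (y : Int) = q.2 then
            (a3.set x (a3.getD y 0)).set y (a3.getD x 0)
          else a3) a2) a) a
    = qs.foldl (fun a q =>
        if 0 ≤ q.1 ∧ q.1 < n ∧ 0 ≤ q.2 ∧ q.2 < n then
          (a.set q.1.toNat (a.getD q.2.toNat 0)).set q.2.toNat (a.getD q.1.toNat 0)
        else a) a := by
  intro qs
  induction qs with
  | nil => intro a n _; rfl
  | cons q qs ih =>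
    intro a n hn
    simp only [List.foldl_cons]
    rw [pv_outer q.1 q.2 a.length a, ← hn]
    by_cases h : 0 ≤ q.1 ∧ q.1 < n ∧ 0 ≤ q.2 ∧ q.2 < n
    · rw [if_pos h]
      exact ih _ n (by simp [hn])
    · rw [if_neg h]
      exact ih _ n hn

-- ===== VERDICT (by name: the statement is the Claim_ definition above) =====
theorem solution_spec : Claim_equal_solution := by
  intro arr queries _
  show solution arr queries = solution_alt arr queries
  unfold solution solution_alt
  exact pv_main queries arr (arr.length : Int) rfl
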